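-- pv_equiv track=rewrite | github.com/airbornemihir/codejam | code_jam_2013/qualification_round/fair_and_square/2.py | bzzt
-- ===== SOURCE A (Python) =====
-- def bzzt(v, brzz):
--     result = 0
--     for i1 in range(0, len(v) - brzz, 1):
--         result *= 10
--         result += v[i1]
--     for i1 in range(len(v) - 1, -1, -1):
--         result *= 10
--         result += v[i1]
--     return result
-- ===== SOURCE B (Python) =====
-- def bzzt(v, brzz):
--     n = len(v)
--     m = n - brzz
--     L = n + m if m > 0 else n
--     pows = []
--     p = 1
--     for _ in range(L):
--         pows.append(p)
--         p *= 10
--     total = 0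
--     for i, d in enumerate(v):
--         w = pows[i]
--         if i < m:
--             w += pows[n + m - 1 - i]
--         total += d * w
--     return total
-- ===== Notes on version B (the rewrite author's own statement) =====
-- stated objective: alternative
-- what changed: Replaces A's two sequential Horner accumulation loops (result = result*10 + digit) with a precomputed power-of-ten table and a single pass over enumerate(v) that adds each digit times its explicit positional weight pows[i] (plus pows[n+m-1-i] for prefix positions).
import Mathlib
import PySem

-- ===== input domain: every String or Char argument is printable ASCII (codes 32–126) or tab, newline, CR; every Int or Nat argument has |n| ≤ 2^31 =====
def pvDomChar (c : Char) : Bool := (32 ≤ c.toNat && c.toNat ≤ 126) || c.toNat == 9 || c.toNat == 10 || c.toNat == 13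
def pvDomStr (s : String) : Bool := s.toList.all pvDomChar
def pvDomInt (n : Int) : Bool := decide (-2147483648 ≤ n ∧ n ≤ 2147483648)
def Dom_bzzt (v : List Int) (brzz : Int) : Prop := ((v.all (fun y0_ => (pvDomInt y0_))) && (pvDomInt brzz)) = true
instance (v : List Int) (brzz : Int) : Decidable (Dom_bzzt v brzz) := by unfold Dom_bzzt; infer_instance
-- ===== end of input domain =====

-- B replaces A's two Horner-style accumulation loops with a single pass that adds each digit times its explicit power-of-ten positional weight (alternative decomposition, same cost).

-- ===== PORT A =====
-- v[i1] is ported as pyGetD with default 0; Pre_bzzt guarantees every index is in range (IndexError excluded).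
def bzzt (v : List Int) (brzz : Int) : Int :=
  let result : Int :=
    (PySem.List.pyRange 0 ((v.length : Int) - brzz) 1).foldl
      (fun result i1 => result * 10 + PySem.List.pyGetD v i1 0) 0
  (PySem.List.pyRange ((v.length : Int) - 1) (-1) (-1)).foldl
    (fun result i1 => result * 10 + PySem.List.pyGetD v i1 0) result

-- ===== PORT B =====
-- builds the power-of-ten table pows once, then one pass over enumerate(v) adds each
-- digit times its explicit positional weight pows[i] (+ pows[n+m-1-i] for prefix positions).
-- pows[...] is ported as pyGetD with default 0; every index taken is in range.
def bzzt_alt (v : List Int) (brzz : Int) : Int :=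
  let n : Int := v.length
  let m : Int := n - brzz
  let L : Int := if 0 < m then n + m else n
  let pows : List Int :=
    ((PySem.List.pyRange 0 L 1).foldl
      (fun (s : List Int × Int) _ => (s.1 ++ [s.2], s.2 * 10)) ([], 1)).1
  (PySem.List.enumerate v 0).foldl
    (fun total p =>
      let w : Int := PySem.List.pyGetD pows p.1 0 +
        (if p.1 < m then PySem.List.pyGetD pows (n + m - 1 - p.1) 0 else 0)
      total + p.2 * w) 0

-- ===== PRECONDITION & SPEC =====
-- Pre_ excludes brzz < 0, on which A's first range runs past the end of v and v[i1] raises IndexError.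
def Pre_bzzt (v : List Int) (brzz : Int) : Prop := 0 ≤ brzz
instance (v : List Int) (brzz : Int) : Decidable (Pre_bzzt v brzz) := by unfold Pre_bzzt; infer_instance
def pvWitness_bzzt : List Int × Int := ([3, 4, 5], 1)

def Spec_bzzt (v : List Int) (brzz : Int) (out : Int) : Prop := out = bzzt_alt v brzz
instance (v : List Int) (brzz : Int) (out : Int) : Decidable (Spec_bzzt v brzz out) := by unfold Spec_bzzt; infer_instance

-- ===== CLAIM (what is proved, stated in full; the proofs are below) =====
def Claim_equal_bzzt : Prop := ∀ (v : List Int) (brzz : Int), Dom_bzzt v brzz → Pre_bzzt v brzz → Spec_bzzt v brzz (bzzt v brzz)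

-- ===== LEMMAS AND PROOFS =====

-- shifting an initial accumulator out of a Horner digit fold
theorem foldl_digits_shift (l : List Int) (r : Int) :
    l.foldl (fun a d => a * 10 + d) r = r * 10 ^ l.length + l.foldl (fun a d => a * 10 + d) 0 := by
  induction l generalizing r with
  | nil => simp
  | cons x xs ih =>
    simp only [List.foldl_cons, List.length_cons]
    rw [ih (r * 10 + x), ih (0 * 10 + x)]
    ring

-- a Horner digit fold is the sum of digits times their positional powers of ten
theorem horner_eq_sum (l : List Int) :
    l.foldl (fun a d => a * 10 + d) 0
      = ∑ k ∈ Finset.range l.length, l.getD k 0 * 10 ^ (l.length - 1 - k) := by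
  induction l with
  | nil => simp
  | cons x xs ih =>
    simp only [List.foldl_cons, List.length_cons]
    rw [foldl_digits_shift, ih, Finset.sum_range_succ']
    have h : ∀ k ∈ Finset.range xs.length,
        (x :: xs).getD (k + 1) 0 * 10 ^ (xs.length + 1 - 1 - (k + 1))
          = xs.getD k 0 * 10 ^ (xs.length - 1 - k) := by
      intro k _
      simp only [List.getD_cons_succ]
      congr 2
      omega
    rw [Finset.sum_congr rfl h]
    simp only [List.getD_cons_zero]
    have : xs.length + 1 - 1 - 0 = xs.length := by omega
    rw [this]
    ring

-- a Horner digit fold over the reverse is the low-to-high positional sum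
theorem horner_reverse_eq_sum (l : List Int) :
    l.reverse.foldl (fun a d => a * 10 + d) 0
      = ∑ k ∈ Finset.range l.length, l.getD k 0 * 10 ^ k := by
  induction l with
  | nil => simp
  | cons x xs ih =>
    rw [List.reverse_cons, List.foldl_append, ih, List.length_cons, Finset.sum_range_succ']
    simp only [List.foldl_cons, List.foldl_nil, List.getD_cons_succ, List.getD_cons_zero]
    rw [Finset.sum_mul]
    have h : ∀ k ∈ Finset.range xs.length,
        xs.getD k 0 * 10 ^ (k + 1) = xs.getD k 0 * 10 ^ k * 10 := by
      intro k _; ring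
    rw [Finset.sum_congr rfl h]
    ring

-- the table-building loop produces the list of powers of ten
theorem pow_table (k : Nat) (acc : List Int) (p : Int) :
    (List.range k).foldl (fun (s : List Int × Int) _ => (s.1 ++ [s.2], s.2 * 10)) (acc, p)
      = (acc ++ (List.range k).map (fun j => p * 10 ^ j), p * 10 ^ k) := by
  induction k generalizing acc p with
  | zero => simp
  | succ k ih =>
    rw [List.range_succ, List.foldl_append, ih, List.map_append]
    simp [List.foldl_cons, pow_succ]
    ring_nf

-- the prefix of indexed values is the take of the list
theorem map_pyGetD_pyRange_take (xs : List Int) (m : Int) (hm : m ≤ (xs.length : Int)) :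
    (PySem.List.pyRange 0 m 1).map (fun j => PySem.List.pyGetD xs j 0) = xs.take m.toNat := by
  by_cases h0 : 0 ≤ m
  · have hsplit : (PySem.List.pyRange 0 m 1).map (fun j => PySem.List.pyGetD xs j 0)
        ++ (PySem.List.pyRange m (xs.length : Int) 1).map (fun j => PySem.List.pyGetD xs j 0) = xs := by
      rw [← List.map_append, ← PySem.List.pyRange_one_append 0 m (xs.length : Int) h0 hm]
      exact PySem.List.map_pyGetD_pyRange_zero' xs 0
    have hlen : ((PySem.List.pyRange 0 m 1).map (fun j => PySem.List.pyGetD xs j 0)).length = m.toNat := by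
      simp [PySem.List.length_pyRange_one]
    conv_rhs => rw [← hsplit]
    rw [← hlen, List.take_left]
  · rw [PySem.List.pyRange_one_eq_nil (by omega), Int.toNat_of_nonpos (by omega)]
    simp

-- ===== VERDICT (by name: the statement is the Claim_ definition above) =====
theorem bzzt_spec : Claim_equal_bzzt := by
  intro v brzz _ hpre
  unfold Pre_bzzt at hpre
  unfold Spec_bzzt bzzt bzzt_alt
  simp only []
  set mN := (((v.length : Int)) - brzz).toNat with hmN
  have hmle : mN ≤ v.length := by omega
  -- ---- A side: rewrite the two loops to take/reverse folds
  have h1 : (PySem.List.pyRange 0 ((v.length : Int) - brzz) 1).foldl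
      (fun a j => a * 10 + PySem.List.pyGetD v j 0) 0
        = (v.take mN).foldl (fun a d => a * 10 + d) 0 := by
    rw [← map_pyGetD_pyRange_take v ((v.length : Int) - brzz) (by omega), List.foldl_map]
  have h2 : ∀ (r : Int),
      (PySem.List.pyRange ((v.length : Int) - 1) (-1) (-1)).foldl
        (fun a j => a * 10 + PySem.List.pyGetD v j 0) r
        = v.reverse.foldl (fun a d => a * 10 + d) r := by
    intro r
    have hrev : PySem.List.pyRange ((v.length : Int) - 1) (-1) (-1)
        = (PySem.List.pyRange 0 ((v.length : Int)) 1).reverse := by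
      rw [PySem.List.pyRange_neg_one_eq_reverse]; norm_num
    rw [hrev]
    conv_rhs => rw [← PySem.List.map_pyGetD_pyRange_zero' v 0, ← List.map_reverse, List.foldl_map]
  rw [h2, foldl_digits_shift, h1, List.length_reverse]
  -- ---- A side as positional sums
  have htake : (v.take mN).foldl (fun a d => a * 10 + d) 0
      = ∑ k ∈ Finset.range mN, v.getD k 0 * 10 ^ (mN - 1 - k) := by
    rw [horner_eq_sum]
    have hl : (v.take mN).length = mN := by simp; omega
    rw [hl]
    refine Finset.sum_congr rfl ?_
    intro k hk
    have hk' : k < mN := Finset.mem_range.mp hk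
    congr 1
    rw [List.getD_eq_getElem _ _ (by omega), List.getD_eq_getElem _ _ (by omega),
        List.getElem_take]
  -- ---- B side: the table then the single weighted-sum fold
  have hpows : (((PySem.List.pyRange 0
        (if 0 < (v.length : Int) - brzz then (v.length : Int) + ((v.length : Int) - brzz) else (v.length : Int)) 1).foldl
      (fun (s : List Int × Int) _ => (s.1 ++ [s.2], s.2 * 10)) ([], 1)).1 : List Int)
      = (List.range (if 0 < (v.length : Int) - brzz then v.length + mN else v.length)).map
          (fun j => (10 : Int) ^ j) := by
    rw [PySem.List.pyRange_one, List.foldl_map, pow_table]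
    have ht : ((if 0 < (v.length : Int) - brzz then (v.length : Int) + ((v.length : Int) - brzz) else (v.length : Int)) - 0).toNat
        = (if 0 < (v.length : Int) - brzz then v.length + mN else v.length) := by
      split_ifs <;> omega
    rw [ht]
    simp
  have hB : (PySem.List.enumerate v 0).foldl
      (fun total (p : Int × Int) =>
        total + p.2 * (PySem.List.pyGetD
            (((PySem.List.pyRange 0
                (if 0 < (v.length : Int) - brzz then (v.length : Int) + ((v.length : Int) - brzz) else (v.length : Int)) 1).foldl
              (fun (s : List Int × Int) _ => (s.1 ++ [s.2], s.2 * 10)) ([], 1)).1) p.1 0 +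
          (if p.1 < (v.length : Int) - brzz then
            PySem.List.pyGetD
              (((PySem.List.pyRange 0
                  (if 0 < (v.length : Int) - brzz then (v.length : Int) + ((v.length : Int) - brzz) else (v.length : Int)) 1).foldl
                (fun (s : List Int × Int) _ => (s.1 ++ [s.2], s.2 * 10)) ([], 1)).1)
              ((v.length : Int) + ((v.length : Int) - brzz) - 1 - p.1) 0
          else 0))) 0
      = ∑ k ∈ Finset.range v.length,
          v.getD k 0 * (10 ^ k +
            (if k < mN then 10 ^ (mN - 1 - k + v.length) else 0)) := by
    rw [PySem.List.foldl_add, hpows, PySem.List.enumerate_eq_map_pyRange (d := 0), List.map_map,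
        PySem.List.pyRange_one]
    simp only [zero_add, PySem.List.len_eq]
    have h0 : (((v.length : Int)) - 0).toNat = v.length := by omega
    rw [h0]
    have hsum : ∀ (f : Nat → Int),
        ((List.range v.length).map f).sum = ∑ k ∈ Finset.range v.length, f k := fun f => rfl
    rw [List.map_map, hsum]
    refine Finset.sum_congr rfl ?_
    intro k hk
    have hk' : k < v.length := Finset.mem_range.mp hk
    simp only [Function.comp]
    have hLN : v.length ≤ (if 0 < (v.length : Int) - brzz then v.length + mN else v.length) := by
      split_ifs <;> omega
    have hlow : PySem.List.pyGetD
        ((List.range (if 0 < (v.length : Int) - brzz then v.length + mN else v.length)).map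
          (fun j => (10 : Int) ^ j)) (k : Int) 0 = 10 ^ k := by
      rw [PySem.List.pyGetD_natCast,
        List.getD_eq_getElem _ _ (by simpa using lt_of_lt_of_le hk' hLN)]
      simp
    rw [hlow, PySem.List.pyGetD_natCast]
    congr 1
    by_cases hc : (k : Int) < ((v.length : Int)) - brzz
    · rw [if_pos hc, if_pos (by omega)]
      rw [PySem.List.pyGetD_of_nonneg _ _ _]
      have hidx : ((v.length : Int) + ((v.length : Int) - brzz) - 1 - (k : Int)).toNat
          = mN - 1 - k + v.length := by omega
      rw [hidx, List.getD_eq_getElem _ _ (by simp; omega), if_pos (by omega : k < mN)]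
      · simp
      · omega
    · rw [if_neg hc, if_neg (by omega)]
  rw [hB, htake, horner_reverse_eq_sum, Finset.sum_mul]
  have hsplit : ∑ k ∈ Finset.range v.length,
      v.getD k 0 * (10 ^ k + (if k < mN then 10 ^ (mN - 1 - k + v.length) else 0))
      = (∑ k ∈ Finset.range v.length, v.getD k 0 * 10 ^ k)
        + ∑ k ∈ Finset.range v.length, (if k < mN then v.getD k 0 * 10 ^ (mN - 1 - k + v.length) else 0) := by
    rw [← Finset.sum_add_distrib]
    refine Finset.sum_congr rfl ?_
    intro k _
    by_cases hc : k < mN <;> simp [hc, mul_add]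
  rw [hsplit]
  have hsub : ∑ k ∈ Finset.range v.length, (if k < mN then v.getD k 0 * 10 ^ (mN - 1 - k + v.length) else 0)
      = ∑ k ∈ Finset.range mN, v.getD k 0 * 10 ^ (mN - 1 - k + v.length) := by
    have hss : Finset.range mN ⊆ Finset.range v.length := by
      intro x hx
      simp only [Finset.mem_range] at hx ⊢
      omega
    rw [← Finset.sum_subset hss]
    · refine Finset.sum_congr rfl ?_
      intro k hk
      rw [if_pos (Finset.mem_range.mp hk)]
    · intro k _ hk
      rw [if_neg (by simpa using hk)]
  rw [hsub]
  have hpow : ∑ k ∈ Finset.range mN, v.getD k 0 * 10 ^ (mN - 1 - k) * 10 ^ v.length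
      = ∑ k ∈ Finset.range mN, v.getD k 0 * 10 ^ (mN - 1 - k + v.length) := by
    refine Finset.sum_congr rfl ?_
    intro k _
    rw [pow_add, mul_assoc]
  rw [hpow]
  ring
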